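-- pv_equiv track=rewrite | github.com/vinchinzu/euler | python/166.py | rows_for_sum
-- ===== SOURCE A (Python) =====
-- from typing import Dict, List
--
-- MIN_DIGIT = 0
--
-- MAX_DIGIT = 9
--
-- ROW_CACHE: Dict[int, List[List[int]]] = {}
--
-- def rows_for_sum(s: int) -> List[List[int]]:
--     """Generate all valid rows with sum s."""
--     if s in ROW_CACHE:
--         return ROW_CACHE[s]
--
--     rows: List[List[int]] = []
--     for a in range(MIN_DIGIT, MAX_DIGIT + 1):
--         if a > s:
--             break
--         for b in range(MIN_DIGIT, MAX_DIGIT + 1):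
--             sum_ab = a + b
--             if sum_ab > s:
--                 break
--             for c in range(MIN_DIGIT, MAX_DIGIT + 1):
--                 sum_abc = sum_ab + c
--                 if sum_abc > s:
--                     break
--                 d = s - sum_abc
--                 if d > MAX_DIGIT:
--                     continue
--                 rows.append([a, b, c, d])
--
--     ROW_CACHE[s] = rows
--     return rows
-- ===== SOURCE B (Python) =====
-- from typing import Dict, List
--
-- MIN_DIGIT = 0
-- MAX_DIGIT = 9
--
-- ROW_CACHE: Dict[int, List[List[int]]] = {}
--
-- def rows_for_sum(s: int) -> List[List[int]]:
--     """Generate all valid rows with sum s (generate-and-test over the digit space)."""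
--     if s in ROW_CACHE:
--         return ROW_CACHE[s]
--
--     rows = [[a, b, c, d]
--             for a in range(MIN_DIGIT, MAX_DIGIT + 1)
--             for b in range(MIN_DIGIT, MAX_DIGIT + 1)
--             for c in range(MIN_DIGIT, MAX_DIGIT + 1)
--             for d in range(MIN_DIGIT, MAX_DIGIT + 1)
--             if a + b + c + d == s]
--
--     ROW_CACHE[s] = rows
--     return rows
-- ===== Notes on version B (the rewrite author's own statement) =====
-- stated objective: idiomatic
-- what changed: Replaced the triple nested loop with early breaks and the directly computed fourth digit by a single generate-and-test comprehension over the full four-digit space filtered by the row sum (cache wrapper kept unchanged).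
import Mathlib
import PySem

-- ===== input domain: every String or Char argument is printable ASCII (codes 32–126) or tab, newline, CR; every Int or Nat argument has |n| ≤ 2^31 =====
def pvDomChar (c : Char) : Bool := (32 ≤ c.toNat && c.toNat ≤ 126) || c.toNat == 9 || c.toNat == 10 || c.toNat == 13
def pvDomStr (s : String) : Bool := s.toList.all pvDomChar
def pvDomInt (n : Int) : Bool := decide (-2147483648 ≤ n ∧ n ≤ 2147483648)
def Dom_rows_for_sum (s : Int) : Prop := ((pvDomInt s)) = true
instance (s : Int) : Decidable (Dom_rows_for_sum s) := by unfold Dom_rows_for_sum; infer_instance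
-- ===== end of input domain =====

-- B replaces A's break/continue loops and computed fourth digit by a full generate-and-test
-- comprehension over all four digits (same rows, same order); the ROW_CACHE memoisation wrapper
-- is a side effect both Pythons keep identically and is not modelled here.

-- ===== PORT A =====
-- inner c-loop: break when sum_abc > s, continue when d > MAX_DIGIT, else append [a,b,c,d]
def pvLoopC (s a b sum_ab : Int) (cs : List Int) (rows : List (List Int)) : List (List Int) :=
  match cs with
  | [] => rows
  | c :: rest =>
    let sum_abc := sum_ab + c
    if sum_abc > s then rows
    else if s - sum_abc > 9 then pvLoopC s a b sum_ab rest rows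
    else pvLoopC s a b sum_ab rest (rows ++ [[a, b, c, s - sum_abc]])

-- middle b-loop: break when sum_ab > s
def pvLoopB (s a : Int) (bs : List Int) (rows : List (List Int)) : List (List Int) :=
  match bs with
  | [] => rows
  | b :: rest =>
    let sum_ab := a + b
    if sum_ab > s then rows
    else pvLoopB s a rest (pvLoopC s a b sum_ab (PySem.List.pyRange 0 10 1) rows)

-- outer a-loop: break when a > s
def pvLoopA (s : Int) (as_ : List Int) (rows : List (List Int)) : List (List Int) :=
  match as_ with
  | [] => rows
  | a :: rest =>
    if a > s then rows
    else pvLoopA s rest (pvLoopB s a (PySem.List.pyRange 0 10 1) rows)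

def rows_for_sum (s : Int) : List (List Int) :=
  pvLoopA s (PySem.List.pyRange 0 10 1) []

-- ===== PORT B =====
-- transliteration of the four-level comprehension filtered by a+b+c+d == s
def rows_for_sum_alt (s : Int) : List (List Int) :=
  (PySem.List.pyRange 0 10 1).flatMap fun a =>
    (PySem.List.pyRange 0 10 1).flatMap fun b =>
      (PySem.List.pyRange 0 10 1).flatMap fun c =>
        (PySem.List.pyRange 0 10 1).flatMap fun d =>
          if a + b + c + d = s then [[a, b, c, d]] else []

-- ===== PRECONDITION & SPEC =====
def Spec_rows_for_sum (s : Int) (out : List (List Int)) : Prop := out = rows_for_sum_alt s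
instance (s : Int) (out : List (List Int)) : Decidable (Spec_rows_for_sum s out) := by unfold Spec_rows_for_sum; infer_instance

-- ===== CLAIM (what is proved, stated in full; the proofs are below) =====
def Claim_equal_rows_for_sum : Prop := ∀ (s : Int), Dom_rows_for_sum s → Spec_rows_for_sum s (rows_for_sum s)

-- ===== LEMMAS AND PROOFS =====

-- the unique row produced for fixed a, b, c (if the forced fourth digit is a digit)
def pvRowC (s a b c : Int) : List (List Int) :=
  if 0 ≤ s - (a + b + c) ∧ s - (a + b + c) ≤ 9 then [[a, b, c, s - (a + b + c)]] else []

theorem range10_eq : PySem.List.pyRange 0 10 1 = [0, 1, 2, 3, 4, 5, 6, 7, 8, 9] := by decide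

theorem range10_bounds : ∀ x ∈ PySem.List.pyRange 0 10 1, 0 ≤ x ∧ x ≤ 9 := by decide

theorem range10_sorted : List.Pairwise (· ≤ ·) (PySem.List.pyRange 0 10 1) := by
  rw [range10_eq]; decide

theorem range10_nodup : (PySem.List.pyRange 0 10 1).Nodup := by rw [range10_eq]; decide

theorem mem_range10 (x : Int) : x ∈ PySem.List.pyRange 0 10 1 ↔ 0 ≤ x ∧ x ≤ 9 := by
  rw [range10_eq]
  simp only [List.mem_cons, List.not_mem_nil, or_false]
  omega

theorem dlevel_gen (s a b c : Int) (ds : List Int) (hnd : ds.Nodup) :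
    ds.flatMap (fun d => if a + b + c + d = s then [[a, b, c, d]] else []) =
      (if s - (a + b + c) ∈ ds then [[a, b, c, s - (a + b + c)]] else []) := by
  induction ds with
  | nil => simp
  | cons d rest ih =>
    obtain ⟨hd, hrest⟩ := List.nodup_cons.mp hnd
    simp only [List.flatMap_cons, List.mem_cons]
    by_cases h : a + b + c + d = s
    · have hds : d = s - (a + b + c) := by omega
      rw [if_pos h, ih hrest, if_neg (by rw [← hds]; exact hd),
        if_pos (Or.inl hds.symm)]
      simp [hds]
    · have hne : ¬ s - (a + b + c) = d := by omega
      rw [if_neg h, ih hrest]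
      simp [hne]

theorem dlevel (s a b c : Int) :
    (PySem.List.pyRange 0 10 1).flatMap
        (fun d => if a + b + c + d = s then [[a, b, c, d]] else []) = pvRowC s a b c := by
  rw [dlevel_gen s a b c _ range10_nodup]
  simp only [mem_range10, pvRowC]

theorem clevel (s a b : Int) (cs : List Int) (hs : List.Pairwise (· ≤ ·) cs)
    (rows : List (List Int)) :
    pvLoopC s a b (a + b) cs rows = rows ++ cs.flatMap (pvRowC s a b) := by
  induction cs generalizing rows with
  | nil => simp [pvLoopC]
  | cons c rest ih =>
    obtain ⟨hc, hrest⟩ := List.pairwise_cons.mp hs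
    unfold pvLoopC
    by_cases h1 : a + b + c > s
    · rw [if_pos h1, List.flatMap_eq_nil_iff.mpr, List.append_nil]
      intro x hx
      rcases List.mem_cons.mp hx with h | h
      · subst h; exact if_neg (by omega)
      · have := hc x h; exact if_neg (by omega)
    · rw [if_neg h1]
      by_cases h2 : s - (a + b + c) > 9
      · rw [if_pos h2, ih hrest rows, List.flatMap_cons,
          show pvRowC s a b c = [] from if_neg (by omega), List.nil_append]
      · rw [if_neg h2, ih hrest, List.flatMap_cons,
          show pvRowC s a b c = [[a, b, c, s - (a + b + c)]] from if_pos (by omega),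
          List.append_assoc]

theorem blevel (s a : Int) (bs : List Int) (hs : List.Pairwise (· ≤ ·) bs)
    (rows : List (List Int)) :
    pvLoopB s a bs rows =
      rows ++ bs.flatMap (fun b => (PySem.List.pyRange 0 10 1).flatMap (pvRowC s a b)) := by
  induction bs generalizing rows with
  | nil => simp [pvLoopB]
  | cons b rest ih =>
    obtain ⟨hb, hrest⟩ := List.pairwise_cons.mp hs
    unfold pvLoopB
    by_cases h1 : a + b > s
    · rw [if_pos h1, List.flatMap_eq_nil_iff.mpr, List.append_nil]
      intro x hx
      have hxb : a + x > s := by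
        rcases List.mem_cons.mp hx with h | h
        · omega
        · have := hb x h; omega
      apply List.flatMap_eq_nil_iff.mpr
      intro c hcmem
      obtain ⟨hc0, _⟩ := range10_bounds c hcmem
      exact if_neg (by omega)
    · rw [if_neg h1, clevel s a b _ range10_sorted, ih hrest, List.flatMap_cons,
        List.append_assoc]

theorem alevel (s : Int) (as_ : List Int) (hs : List.Pairwise (· ≤ ·) as_)
    (rows : List (List Int)) :
    pvLoopA s as_ rows =
      rows ++ as_.flatMap (fun a =>
        (PySem.List.pyRange 0 10 1).flatMap (fun b =>
          (PySem.List.pyRange 0 10 1).flatMap (pvRowC s a b))) := by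
  induction as_ generalizing rows with
  | nil => simp [pvLoopA]
  | cons a rest ih =>
    obtain ⟨ha, hrest⟩ := List.pairwise_cons.mp hs
    unfold pvLoopA
    by_cases h1 : a > s
    · rw [if_pos h1, List.flatMap_eq_nil_iff.mpr, List.append_nil]
      intro x hx
      have hxa : x > s := by
        rcases List.mem_cons.mp hx with h | h
        · omega
        · have := ha x h; omega
      apply List.flatMap_eq_nil_iff.mpr
      intro b hbmem
      obtain ⟨hb0, _⟩ := range10_bounds b hbmem
      apply List.flatMap_eq_nil_iff.mpr
      intro c hcmem
      obtain ⟨hc0, _⟩ := range10_bounds c hcmem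
      exact if_neg (by omega)
    · rw [if_neg h1, blevel s a _ range10_sorted, ih hrest, List.flatMap_cons,
        List.append_assoc]

-- ===== VERDICT (by name: the statement is the Claim_ definition above) =====
theorem rows_for_sum_spec : Claim_equal_rows_for_sum := by
  intro s _
  unfold Spec_rows_for_sum rows_for_sum rows_for_sum_alt
  simp only [dlevel]
  rw [alevel s _ range10_sorted, List.nil_append]
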